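-- pv_equiv track=rewrite | github.com/posl/comment_recommendation_v2 | script/mod_gen/5_time/en/19/2.py | canIWin
-- ===== SOURCE A (Python) =====
-- def canIWin(maxChoosableInteger, desiredTotal):
--     if maxChoosableInteger >= desiredTotal: return True
--     if (maxChoosableInteger + 1) * maxChoosableInteger / 2 < desiredTotal: return False
--     def helper(nums, desiredTotal):
--         if nums[-1] >= desiredTotal: return True
--         for i in range(len(nums)):
--             if not helper(nums[:i] + nums[i + 1:], desiredTotal - nums[i]): return True
--         return False
--     return helper(list(range(1, maxChoosableInteger + 1)), desiredTotal)
-- ===== SOURCE B (Python) =====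
-- def canIWin(maxChoosableInteger, desiredTotal):
--     if maxChoosableInteger >= desiredTotal:
--         return True
--     if maxChoosableInteger * (maxChoosableInteger + 1) // 2 < desiredTotal:
--         return False
--     memo = {}
--
--     def win(used, remaining):
--         if used in memo:
--             return memo[used]
--         res = False
--         for i in range(1, maxChoosableInteger + 1):
--             bit = 1 << (i - 1)
--             if used & bit:
--                 continue
--             if i >= remaining or not win(used | bit, remaining - i):
--                 res = True
--                 break
--         memo[used] = res
--         return res
--
--     return win(0, desiredTotal)
-- ===== Notes on version B (the rewrite author's own statement) =====
-- stated objective: alternative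
-- what changed: Replaces A's recursion over explicit list slices (one branch per permutation of remaining numbers) with a top-down recursion memoized on a bitmask of used integers, so each game state is evaluated at most once.
-- crash fix: On inputs with maxChoosableInteger <= 0, maxChoosableInteger < desiredTotal and maxChoosableInteger*(maxChoosableInteger+1)/2 >= desiredTotal, A indexes the empty list (IndexError); B naturally returns False (no number can be picked). — e.g. on canIWin(-2, -1): A raises IndexError, B returns false
import Mathlib
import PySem

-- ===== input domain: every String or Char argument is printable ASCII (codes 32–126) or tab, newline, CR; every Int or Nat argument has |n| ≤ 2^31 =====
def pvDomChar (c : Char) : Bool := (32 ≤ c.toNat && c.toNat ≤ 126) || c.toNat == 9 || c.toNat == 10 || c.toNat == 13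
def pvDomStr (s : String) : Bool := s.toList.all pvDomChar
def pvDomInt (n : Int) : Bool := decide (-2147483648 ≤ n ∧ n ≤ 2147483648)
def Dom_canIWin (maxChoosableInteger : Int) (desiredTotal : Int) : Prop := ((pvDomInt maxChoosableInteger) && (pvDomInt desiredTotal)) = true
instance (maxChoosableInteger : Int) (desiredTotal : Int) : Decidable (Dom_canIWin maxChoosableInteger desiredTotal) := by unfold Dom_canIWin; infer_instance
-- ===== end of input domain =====

-- B replaces A's recursion over explicit list slices by a top-down recursion memoized on a
-- bitmask of used integers (each game state evaluated at most once); return values agree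
-- wherever A returns.

-- ===== PORT A =====
-- A's inner `helper`, with fuel = len(nums) (exact at every call: each recursive call removes one
-- element).  fuel 0 means nums = [], where Python's nums[-1] raises IndexError (excluded by Pre_);
-- the port returns false there.
def helperA : Nat → List Int → Int → Bool
  | 0, _, _ => false
  | fuel+1, nums, dt =>
    match PySem.List.pyGet? nums (-1) with
    | none => false  -- IndexError in Python (outside Pre_)
    | some last =>
      if last ≥ dt then true
      else
        -- for i in range(len(nums)): if not helper(nums[:i] + nums[i+1:], dt - nums[i]): return True
        (List.range nums.length).any (fun i =>
          ! helperA fuel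
              (PySem.List.slice nums (some 0) (some (i : Int)) ++
               PySem.List.slice nums (some ((i : Int) + 1)) none)
              (dt - nums.getD i 0))

def canIWin (maxChoosableInteger : Int) (desiredTotal : Int) : Bool :=
  if maxChoosableInteger ≥ desiredTotal then true
  -- Python compares the float (m+1)*m/2 with dt; (m+1)*m is always even, so the true division is
  -- the exact integer (m+1)*m/2, and within Dom (|args| ≤ 2^31) the float comparison agrees with
  -- the exact integer comparison: ported as floor division.
  else if PySem.Int.floordiv ((maxChoosableInteger + 1) * maxChoosableInteger) 2 < desiredTotal then false
  else
    helperA (PySem.List.pyRange 1 (maxChoosableInteger + 1) 1).length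
      (PySem.List.pyRange 1 (maxChoosableInteger + 1) 1) desiredTotal

-- ===== PORT B =====
-- 1 << (i - 1); used/bit are always nonnegative Python ints here, represented as Nat
-- (on nonnegative ints Python's <<, &, | coincide with the Nat operations).
def pvBit (i : Int) : Nat := 1 <<< (i - 1).toNat

-- the body of B's for-loop, as structural recursion on the remaining range, with the
-- recursive call `win` passed in (early `break` = returning without scanning the rest)
def loopB (next : Nat → Int → PySem.Dict Nat Bool → Bool × PySem.Dict Nat Bool) :
    List Int → Nat → Int → PySem.Dict Nat Bool → Bool × PySem.Dict Nat Bool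
  | [], _, _, memo => (false, memo)          -- loop ended: res stays False
  | i :: rest, used, remaining, memo =>
    if used &&& pvBit i ≠ 0 then loopB next rest used remaining memo   -- continue
    else if i ≥ remaining then (true, memo)  -- res = True; break (short-circuit `or`)
    else
      let r := next (used ||| pvBit i) (remaining - i) memo
      if r.1 = false then (true, r.2)        -- res = True; break
      else loopB next rest used remaining r.2

-- win(used, remaining) with the memo dict threaded through; fuel = number of free integers
-- (exact at every call: each recursive call sets one more bit); fuel 0 is unreachable with a
-- free integer left, its guard value is the loop's no-iteration result.
def winB : Nat → Int → Nat → Int → PySem.Dict Nat Bool → Bool × PySem.Dict Nat Bool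
  | fuel, m, used, remaining, memo =>
    match memo.get? used with
    | some b => (b, memo)                    -- if used in memo: return memo[used]
    | none =>
      let next := match fuel with
        | 0 => fun _ _ mm => (false, mm)     -- fuel guard, unreachable
        | fuel'+1 => winB fuel' m
      let r := loopB next (PySem.List.pyRange 1 (m + 1) 1) used remaining memo
      (r.1, r.2.insert used r.1)             -- memo[used] = res; return res

def canIWin_alt (maxChoosableInteger : Int) (desiredTotal : Int) : Bool :=
  if maxChoosableInteger ≥ desiredTotal then true
  else if PySem.Int.floordiv (maxChoosableInteger * (maxChoosableInteger + 1)) 2 < desiredTotal then false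
  else
    (winB (PySem.List.pyRange 1 (maxChoosableInteger + 1) 1).length maxChoosableInteger
      0 desiredTotal PySem.Dict.empty).1

-- ===== PRECONDITION & SPEC =====
-- Pre_ excludes exactly the inputs on which Python A raises IndexError: maxChoosableInteger ≤ 0
-- together with maxChoosableInteger < desiredTotal ≤ maxChoosableInteger*(maxChoosableInteger+1)/2,
-- where A's helper indexes the empty list.
def Pre_canIWin (maxChoosableInteger : Int) (desiredTotal : Int) : Prop :=
  1 ≤ maxChoosableInteger ∨ desiredTotal ≤ maxChoosableInteger ∨
    (maxChoosableInteger + 1) * maxChoosableInteger < 2 * desiredTotal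
instance (maxChoosableInteger : Int) (desiredTotal : Int) : Decidable (Pre_canIWin maxChoosableInteger desiredTotal) := by unfold Pre_canIWin; infer_instance
def pvWitness_canIWin : Int × Int := (4, 6)

-- On inputs with maxChoosableInteger ≤ 0 < desiredTotal - maxChoosableInteger and
-- 2*desiredTotal ≤ maxChoosableInteger*(maxChoosableInteger+1), A raises IndexError
-- (helper indexes the empty list); B naturally returns False (no number can be picked).
def Raises_canIWin (maxChoosableInteger : Int) (desiredTotal : Int) : Prop :=
  maxChoosableInteger ≤ 0 ∧ maxChoosableInteger < desiredTotal ∧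
    2 * desiredTotal ≤ (maxChoosableInteger + 1) * maxChoosableInteger
instance (maxChoosableInteger : Int) (desiredTotal : Int) : Decidable (Raises_canIWin maxChoosableInteger desiredTotal) := by unfold Raises_canIWin; infer_instance
def pvRaiseWitness_canIWin : Int × Int := (-2, -1)
def pvRaiseWitnessOut_canIWin : Bool := false

def Spec_canIWin (maxChoosableInteger : Int) (desiredTotal : Int) (out : Bool) : Prop := out = canIWin_alt maxChoosableInteger desiredTotal
instance (maxChoosableInteger : Int) (desiredTotal : Int) (out : Bool) : Decidable (Spec_canIWin maxChoosableInteger desiredTotal out) := by unfold Spec_canIWin; infer_instance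

-- ===== CLAIM (what is proved, stated in full; the proofs are below) =====
def Claim_equal_canIWin : Prop := ∀ (maxChoosableInteger : Int) (desiredTotal : Int), Dom_canIWin maxChoosableInteger desiredTotal → Pre_canIWin maxChoosableInteger desiredTotal → Spec_canIWin maxChoosableInteger desiredTotal (canIWin maxChoosableInteger desiredTotal)
def Claim_raises_canIWin : Prop := (∀ (maxChoosableInteger : Int) (desiredTotal : Int), Dom_canIWin maxChoosableInteger desiredTotal → Raises_canIWin maxChoosableInteger desiredTotal → ¬ Pre_canIWin maxChoosableInteger desiredTotal) ∧ (Dom_canIWin (pvRaiseWitness_canIWin.1) (pvRaiseWitness_canIWin.2) ∧ Raises_canIWin (pvRaiseWitness_canIWin.1) (pvRaiseWitness_canIWin.2) ∧ canIWin_alt (pvRaiseWitness_canIWin.1) (pvRaiseWitness_canIWin.2) = pvRaiseWitnessOut_canIWin)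

-- ===== LEMMAS AND PROOFS =====

-- the ascending list of still-available integers encoded by the mask u
def freeList (m : Int) (u : Nat) : List Int :=
  (PySem.List.pyRange 1 (m + 1) 1).filter (fun i => u &&& pvBit i == 0)

-- the game value, as pure structural recursion on the number of free integers
def pureW : Nat → Int → Nat → Int → Bool
  | 0, _, _, _ => false
  | f+1, m, u, rem =>
    (freeList m u).any (fun i => rem ≤ i || ! pureW f m (u ||| pvBit i) (rem - i))

def V (m : Int) (u : Nat) (rem : Int) : Bool := pureW (freeList m u).length m u rem

-- the `remaining` value determined by the mask u (dt minus the sum of used integers)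
def keyRem (m dt : Int) (u : Nat) : Int :=
  dt - (PySem.List.pyRange 1 (m + 1) 1).sum + (freeList m u).sum

-- memo invariant: every stored value is the game value of its mask
def MemoInv (m dt : Int) (memo : PySem.Dict Nat Bool) : Prop :=
  ∀ u b, memo.get? u = some b → b = V m u (keyRem m dt u)

theorem and_pow_eq_zero (x : Nat) (k : Nat) : (x &&& 2^k = 0) ↔ x.testBit k = false := by
  rw [Nat.and_two_pow]
  rcases h : x.testBit k <;> simp

theorem bitfree_or (u : Nat) (i j : Int) (hi : 1 ≤ i) (hj : 1 ≤ j) :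
    ((u ||| pvBit j) &&& pvBit i = 0) ↔ (u &&& pvBit i = 0 ∧ i ≠ j) := by
  unfold pvBit
  rw [Nat.one_shiftLeft, Nat.one_shiftLeft, and_pow_eq_zero, and_pow_eq_zero,
    Nat.testBit_or, Nat.testBit_two_pow]
  rcases h : u.testBit ((i-1).toNat) <;> simp [h] <;> omega

theorem mem_freeList (m : Int) (u : Nat) (x : Int) :
    x ∈ freeList m u ↔ (1 ≤ x ∧ x < m + 1) ∧ u &&& pvBit x = 0 := by
  unfold freeList
  simp [List.mem_filter, PySem.List.mem_pyRange_one]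

theorem nodup_freeList (m : Int) (u : Nat) : (freeList m u).Nodup :=
  (PySem.List.nodup_pyRange_one 1 (m+1)).filter _

theorem pairwise_freeList (m : Int) (u : Nat) : (freeList m u).Pairwise (· < ·) :=
  List.Pairwise.filter _ (PySem.List.pairwise_lt_pyRange_one 1 (m+1))

theorem freeList_or (m : Int) (u : Nat) (x : Int) (hx : x ∈ freeList m u) :
    freeList m (u ||| pvBit x) = (freeList m u).erase x := by
  rw [List.Nodup.erase_eq_filter (nodup_freeList m u) x]
  unfold freeList
  rw [List.filter_filter]
  apply List.filter_congr
  intro i hi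
  have hi1 : 1 ≤ i := (PySem.List.mem_pyRange_one.mp hi).1
  have hx1 : 1 ≤ x := ((mem_freeList m u x).mp hx).1.1
  rcases h : (u ||| pvBit x) &&& pvBit i == 0
  · have := (bitfree_or u i x hi1 hx1).not.mp (by simpa using h)
    rcases h2 : (u &&& pvBit i == 0) <;> simp_all [not_and_or]
  · have := (bitfree_or u i x hi1 hx1).mp (by simpa using h)
    simp [this.1, this.2]

theorem length_freeList_or (m : Int) (u : Nat) (x : Int) (hx : x ∈ freeList m u) :
    (freeList m (u ||| pvBit x)).length + 1 = (freeList m u).length := by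
  rw [freeList_or m u x hx]; exact List.length_erase_add_one hx

theorem keyRem_or (m dt : Int) (u : Nat) (x : Int) (hx : x ∈ freeList m u) :
    keyRem m dt (u ||| pvBit x) = keyRem m dt u - x := by
  unfold keyRem
  rw [freeList_or m u x hx]
  have hperm := (List.perm_cons_erase hx).sum_eq
  rw [List.sum_cons] at hperm
  omega

-- helper list-order lemmas
theorem mem_le_getLast {l : List Int} (h : l.Pairwise (· < ·)) {x : Int} (hx : x ∈ l)
    (hne : l ≠ []) : x ≤ l.getLast hne := by
  induction l with
  | nil => cases hx
  | cons a t ih =>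
    rcases eq_or_ne t [] with rfl | hte
    · simp at hx; simp [hx]
    · rw [List.getLast_cons hte]
      rcases List.mem_cons.mp hx with rfl | hxt
      · have halt : ∀ y ∈ t, x < y := (List.pairwise_cons.mp h).1
        exact le_of_lt (halt _ (List.getLast_mem hte))
      · exact ih (List.pairwise_cons.mp h).2 hxt hte

theorem any_congr_mem {l : List Int} {f g : Int → Bool} (h : ∀ x ∈ l, f x = g x) :
    l.any f = l.any g := by
  induction l with
  | nil => rfl
  | cons a t ih => simp_all [List.any_cons]

-- A's slice expression is eraseIdx
theorem slice_erase (nums : List Int) (i : Nat) :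
    PySem.List.slice nums (some 0) (some (i : Int)) ++
      PySem.List.slice nums (some ((i : Int) + 1)) none = nums.eraseIdx i := by
  have h1 : PySem.List.slice nums (some (0:Int)) (some (i:Int)) = nums.take i := by
    simpa using PySem.List.slice_natCast nums 0 i
  have h2 : PySem.List.slice nums (some ((i:Int)+1)) none = nums.drop (i+1) := by
    have : ((i:Int)+1) = ((i+1 : Nat) : Int) := by push_cast; ring
    rw [this, PySem.List.slice_from_natCast]
  rw [h1, h2, List.eraseIdx_eq_take_drop_succ]

-- L1: A's helper computes the pure game value
theorem helperA_eq_pureW (m : Int) : ∀ (k : Nat) (u : Nat) (rem : Int),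
    k = (freeList m u).length → helperA k (freeList m u) rem = pureW k m u rem := by
  intro k
  induction k using Nat.strong_induction_on with
  | _ k ih =>
    intro u rem hk
    match k, hk with
    | 0, hk => simp [helperA, pureW]
    | (k'+1), hk =>
      have hne : freeList m u ≠ [] := by
        intro h; rw [h] at hk; simp at hk
      have hlast : PySem.List.pyGet? (freeList m u) (-1)
          = some ((freeList m u).getLast hne) := by
        rw [PySem.List.pyGet?_neg_one, List.getLast?_eq_some_getLast]
      simp only [helperA, hlast]
      by_cases hge : (freeList m u).getLast hne ≥ rem
      · rw [if_pos hge]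
        have : pureW (k'+1) m u rem = true := by
          rw [pureW, List.any_eq_true]
          exact ⟨(freeList m u).getLast hne, List.getLast_mem hne, by simp [hge]⟩
        rw [this]
      · rw [if_neg hge]
        have hlt : ∀ x ∈ freeList m u, ¬ (rem ≤ x) := by
          intro x hx hcon
          exact hge (le_trans hcon (mem_le_getLast (pairwise_freeList m u) hx hne))
        have hpw : pureW (k'+1) m u rem
            = (freeList m u).any (fun x => ! pureW k' m (u ||| pvBit x) (rem - x)) := by
          rw [pureW]
          apply any_congr_mem
          intro x hx
          simp [hlt x hx]
        rw [hpw]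
        have key : ∀ (i : Nat) (hi : i < (freeList m u).length),
            (! helperA k'
                (PySem.List.slice (freeList m u) (some 0) (some (i : Int)) ++
                  PySem.List.slice (freeList m u) (some ((i : Int) + 1)) none)
                (rem - (freeList m u).getD i 0))
              = ! pureW k' m (u ||| pvBit ((freeList m u)[i])) (rem - (freeList m u)[i]) := by
          intro i hi
          have hmem : (freeList m u)[i] ∈ freeList m u := List.getElem_mem hi
          have hlist : PySem.List.slice (freeList m u) (some 0) (some (i : Int)) ++
                PySem.List.slice (freeList m u) (some ((i : Int) + 1)) none
              = freeList m (u ||| pvBit ((freeList m u)[i])) := by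
            rw [slice_erase, (List.Nodup.erase_getElem (nodup_freeList m u) i hi).symm,
              freeList_or m u _ hmem]
          rw [hlist, List.getD_eq_getElem _ 0 hi,
            ih k' (by omega) _ _ (by rw [← length_freeList_or m u _ hmem] at hk; omega)]
        rw [Bool.eq_iff_iff, List.any_eq_true, List.any_eq_true]
        constructor
        · rintro ⟨i, hi, hFi⟩
          have hi' : i < (freeList m u).length := List.mem_range.mp hi
          rw [key i hi'] at hFi
          exact ⟨(freeList m u)[i], List.getElem_mem hi', hFi⟩
        · rintro ⟨x, hx, hGx⟩
          have hi : (freeList m u).idxOf x < (freeList m u).length :=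
            List.idxOf_lt_length_of_mem hx
          refine ⟨(freeList m u).idxOf x, List.mem_range.mpr hi, ?_⟩
          rw [key _ hi, List.getElem_idxOf hi]
          exact hGx

-- L2: B's memoized recursion computes the pure game value and preserves the invariant
theorem loopB_spec (m dt : Int) (u : Nat)
    (next : Nat → Int → PySem.Dict Nat Bool → Bool × PySem.Dict Nat Bool)
    (hnext : ∀ x ∈ freeList m u, ∀ memo, MemoInv m dt memo →
      (next (u ||| pvBit x) (keyRem m dt u - x) memo).1
          = V m (u ||| pvBit x) (keyRem m dt u - x) ∧
        MemoInv m dt (next (u ||| pvBit x) (keyRem m dt u - x) memo).2) :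
    ∀ (is : List Int), (∀ i ∈ is, i ∈ PySem.List.pyRange 1 (m + 1) 1) →
      ∀ memo, MemoInv m dt memo →
      (loopB next is u (keyRem m dt u) memo).1
        = (is.filter (fun i => u &&& pvBit i == 0)).any
            (fun i => keyRem m dt u ≤ i || ! V m (u ||| pvBit i) (keyRem m dt u - i)) ∧
      MemoInv m dt (loopB next is u (keyRem m dt u) memo).2 := by
  intro is
  induction is with
  | nil => intro _ memo hm; simpa [loopB] using hm
  | cons i rest ihr =>
    intro hsub memo hm
    have hir : i ∈ PySem.List.pyRange 1 (m + 1) 1 := hsub i (List.mem_cons_self ..)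
    have hrest : ∀ j ∈ rest, j ∈ PySem.List.pyRange 1 (m + 1) 1 :=
      fun j hj => hsub j (List.mem_cons_of_mem _ hj)
    by_cases hfree : u &&& pvBit i = 0
    case neg =>
      have : (loopB next (i :: rest) u (keyRem m dt u) memo)
          = loopB next rest u (keyRem m dt u) memo := by
        rw [loopB]; rw [if_pos hfree]
      rw [this]
      have hfilter : (i :: rest).filter (fun j => u &&& pvBit j == 0)
          = rest.filter (fun j => u &&& pvBit j == 0) := by
        rw [List.filter_cons_of_neg (by simpa using hfree)]
      rw [hfilter]
      exact ihr hrest memo hm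
    case pos =>
      have hmemF : i ∈ freeList m u := by
        rw [mem_freeList]
        exact ⟨PySem.List.mem_pyRange_one.mp hir, hfree⟩
      have hfilter : (i :: rest).filter (fun j => u &&& pvBit j == 0)
          = i :: rest.filter (fun j => u &&& pvBit j == 0) := by
        rw [List.filter_cons_of_pos (by simpa using hfree)]
      rw [hfilter, List.any_cons]
      by_cases hge : i ≥ keyRem m dt u
      · have : (loopB next (i :: rest) u (keyRem m dt u) memo) = (true, memo) := by
          rw [loopB, if_neg (by simpa using hfree), if_pos hge]
        rw [this]
        refine ⟨by simp [hge], hm⟩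
      · have hnx := hnext i hmemF memo hm
        set r := next (u ||| pvBit i) (keyRem m dt u - i) memo with hr
        have hstep : (loopB next (i :: rest) u (keyRem m dt u) memo)
            = if r.1 = false then (true, r.2)
              else loopB next rest u (keyRem m dt u) r.2 := by
          rw [loopB, if_neg (by simpa using hfree), if_neg hge]
        rcases hb : r.1
        · rw [hstep, hb]
          simp only [if_pos rfl]
          refine ⟨?_, hnx.2⟩
          have : V m (u ||| pvBit i) (keyRem m dt u - i) = false := by rw [← hnx.1, hb]
          simp [this, hge]
        · rw [hstep, hb]
          rw [if_neg (by simp : ¬ ((true : Bool) = false))]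
          have hrec := ihr hrest r.2 hnx.2
          refine ⟨?_, hrec.2⟩
          rw [hrec.1]
          have : V m (u ||| pvBit i) (keyRem m dt u - i) = true := by rw [← hnx.1, hb]
          simp [this, hge]

theorem winB_eq (f : Nat) (m : Int) (u : Nat) (rem : Int) (memo : PySem.Dict Nat Bool) :
    winB f m u rem memo =
      match memo.get? u with
      | some b => (b, memo)
      | none =>
        let r := loopB (match f with
            | 0 => fun _ _ mm => (false, mm)
            | fuel'+1 => winB fuel' m) (PySem.List.pyRange 1 (m + 1) 1) u rem memo
        (r.1, r.2.insert u r.1) := by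
  cases f <;> rw [winB.eq_def]

theorem any_eq_V (m dt : Int) (u : Nat) :
    ((freeList m u).any
        (fun i => keyRem m dt u ≤ i || ! V m (u ||| pvBit i) (keyRem m dt u - i)))
      = V m u (keyRem m dt u) := by
  rw [V]
  cases hlen : (freeList m u).length with
  | zero =>
    have : freeList m u = [] := List.length_eq_zero_iff.mp hlen
    rw [this]; simp [pureW]
  | succ k =>
    rw [pureW]
    apply any_congr_mem
    intro x hx
    have hl : k = (freeList m (u ||| pvBit x)).length := by
      have := length_freeList_or m u x hx; omega
    rw [V, ← hl]

theorem winB_finish (m dt : Int) (u : Nat) (r : Bool × PySem.Dict Nat Bool)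
    (h1 : r.1 = V m u (keyRem m dt u)) (h2 : MemoInv m dt r.2) :
    ((r.1, r.2.insert u r.1) : Bool × PySem.Dict Nat Bool).1 = V m u (keyRem m dt u) ∧
      MemoInv m dt ((r.1, r.2.insert u r.1) : Bool × PySem.Dict Nat Bool).2 := by
  refine ⟨h1, ?_⟩
  intro u' b hb
  simp only [PySem.Dict.get?_insert] at hb
  rcases eq_or_ne u' u with rfl | hne
  · rw [if_pos rfl] at hb
    cases hb
    exact h1
  · rw [if_neg hne] at hb
    exact h2 u' b hb

theorem winB_spec (m dt : Int) : ∀ (f : Nat) (u : Nat) (memo : PySem.Dict Nat Bool),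
    MemoInv m dt memo → f = (freeList m u).length →
    (winB f m u (keyRem m dt u) memo).1 = V m u (keyRem m dt u) ∧
      MemoInv m dt (winB f m u (keyRem m dt u) memo).2 := by
  intro f
  induction f using Nat.strong_induction_on with
  | _ f ihf =>
    intro u memo hm hf
    rw [winB_eq]
    cases hget : memo.get? u with
    | some b => exact ⟨hm u b hget, hm⟩
    | none =>
      dsimp only
      match f, hf with
      | 0, hf =>
        have hempty : freeList m u = [] := List.length_eq_zero_iff.mp hf.symm
        have hnext : ∀ x ∈ freeList m u, ∀ memo', MemoInv m dt memo' →
            ((fun (_ : Nat) (_ : Int) (mm : PySem.Dict Nat Bool) => ((false : Bool), mm))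
                (u ||| pvBit x) (keyRem m dt u - x) memo').1
              = V m (u ||| pvBit x) (keyRem m dt u - x) ∧
            MemoInv m dt ((fun (_ : Nat) (_ : Int) (mm : PySem.Dict Nat Bool) => ((false : Bool), mm))
                (u ||| pvBit x) (keyRem m dt u - x) memo').2 := by
          rw [hempty]; intro x hx; cases hx
        have hloop := loopB_spec m dt u (fun _ _ mm => (false, mm)) hnext
          (PySem.List.pyRange 1 (m + 1) 1) (fun _ h => h) memo hm
        exact winB_finish m dt u _ (by rw [hloop.1]; exact any_eq_V m dt u) hloop.2
      | (f'+1), hf =>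
        have hnext : ∀ x ∈ freeList m u, ∀ memo', MemoInv m dt memo' →
            (winB f' m (u ||| pvBit x) (keyRem m dt u - x) memo').1
              = V m (u ||| pvBit x) (keyRem m dt u - x) ∧
            MemoInv m dt (winB f' m (u ||| pvBit x) (keyRem m dt u - x) memo').2 := by
          intro x hx memo' hm'
          have hlen : f' = (freeList m (u ||| pvBit x)).length := by
            have := length_freeList_or m u x hx; omega
          have := ihf f' (by omega) (u ||| pvBit x) memo' hm' hlen
          rw [keyRem_or m dt u x hx] at this
          exact this
        have hloop := loopB_spec m dt u (winB f' m) hnext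
          (PySem.List.pyRange 1 (m + 1) 1) (fun _ h => h) memo hm
        exact winB_finish m dt u _ (by rw [hloop.1]; exact any_eq_V m dt u) hloop.2

theorem freeList_zero (m : Int) : freeList m 0 = PySem.List.pyRange 1 (m + 1) 1 := by
  unfold freeList
  simp [Nat.zero_and]

-- ===== VERDICT (by name: the statement is the Claim_ definition above) =====
theorem canIWin_spec : Claim_equal_canIWin := by
  intro m dt _ _
  unfold Spec_canIWin canIWin canIWin_alt
  by_cases h1 : m ≥ dt
  · rw [if_pos h1, if_pos h1]
  · rw [if_neg h1, if_neg h1]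
    rw [show (m + 1) * m = m * (m + 1) from by ring]
    by_cases h2 : PySem.Int.floordiv (m * (m + 1)) 2 < dt
    · rw [if_pos h2, if_pos h2]
    · rw [if_neg h2, if_neg h2]
      have hz := freeList_zero m
      have hkey : keyRem m dt 0 = dt := by
        unfold keyRem; rw [freeList_zero]; ring
      have hA : helperA (PySem.List.pyRange 1 (m + 1) 1).length
          (PySem.List.pyRange 1 (m + 1) 1) dt = V m 0 dt := by
        rw [← hz, V]
        exact helperA_eq_pureW m _ 0 dt rfl
      have hInv : MemoInv m dt PySem.Dict.empty := by
        intro u b hb; rw [PySem.Dict.get?_empty] at hb; cases hb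
      have hB := winB_spec m dt (PySem.List.pyRange 1 (m + 1) 1).length 0
        PySem.Dict.empty hInv (by rw [hz])
      rw [hkey] at hB
      rw [hA, hB.1]

theorem canIWin_raises : Claim_raises_canIWin := by
  unfold Claim_raises_canIWin
  constructor
  · intro m dt _ hr
    unfold Raises_canIWin at hr
    unfold Pre_canIWin
    omega
  · refine ⟨by decide, by decide, by decide⟩

-- both delivered claims, bundled
theorem canIWin_claims_ok : Claim_equal_canIWin ∧ Claim_raises_canIWin :=
  ⟨canIWin_spec, canIWin_raises⟩
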